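-- pv_equiv track=rewrite | github.com/ArslanJajja1/Data-Structures-and-Algorithms-Problems-solved | 2.Stacks/17.Sunset view.py | count_buildings_facing_sunset
-- ===== SOURCE A (Python) =====
-- def count_buildings_facing_sunset(buildings,direction):
--     stack = []
--     step = 1 if direction == "EAST" else -1
--     start = 0 if direction == "EAST" else len(buildings)-1
--     index = start
--     while index >= 0  and index < len(buildings):
--         while len(stack)>0 and buildings[stack[-1]] <= buildings[index]:
--             stack.pop()
--         stack.append(index)
--         index += step
--     return stack if direction == "EAST" else stack[::-1]
-- ===== SOURCE B (Python) =====
-- def count_buildings_facing_sunset(buildings, direction):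
--     n = len(buildings)
--     idx = range(n - 1, -1, -1) if direction == "EAST" else range(n)
--     out, best = [], None
--     for i in idx:
--         if best is None or buildings[i] > best:
--             out.append(i)
--             best = buildings[i]
--     return out[::-1] if direction == "EAST" else out
-- ===== Notes on version B (the rewrite author's own statement) =====
-- stated objective: simpler
-- what changed: Replaces the monotonic stack with its inner pop loop by a single running-max scan from the sunset side (right-to-left for EAST, left-to-right otherwise), collecting indices whose height strictly exceeds the max seen so far.
import Mathlib
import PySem

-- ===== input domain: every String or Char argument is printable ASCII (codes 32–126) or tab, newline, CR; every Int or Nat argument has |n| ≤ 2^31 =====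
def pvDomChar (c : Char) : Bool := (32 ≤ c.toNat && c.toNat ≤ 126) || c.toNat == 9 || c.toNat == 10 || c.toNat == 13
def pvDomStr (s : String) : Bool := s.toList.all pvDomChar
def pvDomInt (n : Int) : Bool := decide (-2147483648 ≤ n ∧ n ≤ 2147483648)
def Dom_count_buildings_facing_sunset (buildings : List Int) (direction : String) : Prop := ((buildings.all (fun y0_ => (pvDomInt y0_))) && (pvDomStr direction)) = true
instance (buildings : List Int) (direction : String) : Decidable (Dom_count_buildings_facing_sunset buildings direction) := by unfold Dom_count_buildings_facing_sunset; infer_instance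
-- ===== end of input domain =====

-- B replaces A's monotonic stack (with inner pop loop) by a single running-max scan
-- from the sunset side; same output, same O(n) cost (objective: simpler).

-- ===== PORT A =====
-- The Python stack is kept TOP-FIRST (head = stack[-1]); so Python's `stack` is
-- `r.reverse`, `stack[::-1]` is `r`, append is cons, pop is tail.
-- Inner while loop: pop while the stack is nonempty and buildings[stack[-1]] <= h.
def pvPop (b : List Int) (h : Int) : List Int → List Int
  | [] => []
  | t :: r => if PySem.List.pyGetD b t 0 ≤ h then pvPop b h r else t :: r

-- Outer while loop; fuel = len(buildings) bounds it exactly (the Python guard is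
-- still checked every iteration). buildings[index] is in range whenever read.
def pvLoopA (b : List Int) (stp : Int) : Nat → Int → List Int → List Int
  | 0, _, r => r
  | f+1, index, r =>
    if 0 ≤ index ∧ index < (b.length : Int) then
      pvLoopA b stp f (index + stp) (index :: pvPop b (PySem.List.pyGetD b index 0) r)
    else r

def count_buildings_facing_sunset (buildings : List Int) (direction : String) : List Int :=
  let stp : Int := if direction == "EAST" then 1 else -1
  let start : Int := if direction == "EAST" then 0 else (buildings.length : Int) - 1
  let r := pvLoopA buildings stp buildings.length start []
  if direction == "EAST" then r.reverse else r

-- ===== PORT B =====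
-- One scan step: keep index i iff best is None or buildings[i] > best.
def pvStepB (b : List Int) (s : List Int × Option Int) (i : Int) : List Int × Option Int :=
  match s.2 with
  | none => (s.1 ++ [i], some (PySem.List.pyGetD b i 0))
  | some m =>
    if m < PySem.List.pyGetD b i 0 then (s.1 ++ [i], some (PySem.List.pyGetD b i 0)) else s

def count_buildings_facing_sunset_alt (buildings : List Int) (direction : String) : List Int :=
  let n : Int := (buildings.length : Int)
  let idx := if direction == "EAST" then PySem.List.pyRange (n-1) (-1) (-1) else PySem.List.pyRange 0 n 1
  let out := (idx.foldl (pvStepB buildings) ([], none)).1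
  if direction == "EAST" then out.reverse else out

-- ===== PRECONDITION & SPEC =====
def Spec_count_buildings_facing_sunset (buildings : List Int) (direction : String) (out : List Int) : Prop := out = count_buildings_facing_sunset_alt buildings direction
instance (buildings : List Int) (direction : String) (out : List Int) : Decidable (Spec_count_buildings_facing_sunset buildings direction out) := by unfold Spec_count_buildings_facing_sunset; infer_instance

-- ===== CLAIM (what is proved, stated in full; the proofs are below) =====
def Claim_equal_count_buildings_facing_sunset : Prop := ∀ (buildings : List Int) (direction : String), Dom_count_buildings_facing_sunset buildings direction → Spec_count_buildings_facing_sunset buildings direction (count_buildings_facing_sunset buildings direction)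

-- ===== LEMMAS AND PROOFS =====

-- Running-max record scan, the common characterisation of both programs.
def pvRecs (b : List Int) : Option Int → List Int → List Int
  | _, [] => []
  | best, i :: W =>
    match best with
    | none => i :: pvRecs b (some (PySem.List.pyGetD b i 0)) W
    | some m =>
      if m < PySem.List.pyGetD b i 0 then i :: pvRecs b (some (PySem.List.pyGetD b i 0)) W
      else pvRecs b (some m) W

-- A's stack step, as a fold function.
def pvStepA (b : List Int) (r : List Int) (i : Int) : List Int :=
  i :: pvPop b (PySem.List.pyGetD b i 0) r

theorem pvRecs_mem_gt (b : List Int) (W : List Int) :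
    ∀ m j, j ∈ pvRecs b (some m) W → m < PySem.List.pyGetD b j 0 := by
  induction W with
  | nil => intro m j h; simp [pvRecs] at h
  | cons i W ih =>
    intro m j h
    simp only [pvRecs] at h
    by_cases hm : m < PySem.List.pyGetD b i 0
    · rw [if_pos hm] at h
      rcases List.mem_cons.mp h with rfl | h
      · exact hm
      · exact lt_trans hm (ih _ _ h)
    · rw [if_neg hm] at h
      exact ih _ _ h

theorem pvRecs_some_eq_filter (b : List Int) (W : List Int) :
    ∀ h, pvRecs b (some h) W
      = (pvRecs b none W).filter (fun j => decide (h < PySem.List.pyGetD b j 0)) := by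
  induction W with
  | nil => intro h; rfl
  | cons i W ih =>
    intro h
    simp only [pvRecs]
    by_cases hh : h < PySem.List.pyGetD b i 0
    · rw [if_pos hh]
      simp only [List.filter_cons, hh, decide_true, if_true]
      congr 1
      refine (List.filter_eq_self.mpr ?_).symm
      intro j hj
      exact decide_eq_true (lt_trans hh (pvRecs_mem_gt b W _ j hj))
    · rw [if_neg hh]
      simp only [List.filter_cons, hh, decide_false, if_false, Bool.false_eq_true]
      rw [ih h, ih (PySem.List.pyGetD b i 0), List.filter_filter]
      refine List.filter_congr ?_
      intro j _
      by_cases hj : h < PySem.List.pyGetD b j 0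
      · have : PySem.List.pyGetD b i 0 < PySem.List.pyGetD b j 0 := lt_of_le_of_lt (not_lt.mp hh) hj
        simp [hj, this]
      · simp [hj]

theorem pvRecs_pairwise (b : List Int) (W : List Int) :
    ∀ best, (pvRecs b best W).Pairwise
      (fun a c => PySem.List.pyGetD b a 0 < PySem.List.pyGetD b c 0) := by
  induction W with
  | nil => intro best; simp [pvRecs]
  | cons i W ih =>
    intro best
    match best with
    | none =>
      simp only [pvRecs]
      exact List.pairwise_cons.mpr ⟨fun j hj => pvRecs_mem_gt b W _ j hj, ih _⟩
    | some m =>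
      simp only [pvRecs]
      by_cases hm : m < PySem.List.pyGetD b i 0
      · rw [if_pos hm]
        exact List.pairwise_cons.mpr ⟨fun j hj => pvRecs_mem_gt b W _ j hj, ih _⟩
      · rw [if_neg hm]; exact ih _

theorem pvPop_eq_filter (b : List Int) (h : Int) (l : List Int)
    (hp : l.Pairwise (fun a c => PySem.List.pyGetD b a 0 < PySem.List.pyGetD b c 0)) :
    pvPop b h l = l.filter (fun j => decide (h < PySem.List.pyGetD b j 0)) := by
  induction l with
  | nil => rfl
  | cons t r ih =>
    rcases List.pairwise_cons.mp hp with ⟨ht, hr⟩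
    simp only [pvPop]
    by_cases hle : PySem.List.pyGetD b t 0 ≤ h
    · rw [if_pos hle, ih hr, List.filter_cons]
      have : ¬ h < PySem.List.pyGetD b t 0 := not_lt.mpr hle
      simp [this]
    · rw [if_neg hle, List.filter_cons]
      have hgt : h < PySem.List.pyGetD b t 0 := not_le.mp hle
      simp only [hgt, decide_true, if_true]
      congr 1
      refine (List.filter_eq_self.mpr ?_).symm
      intro j hj
      exact decide_eq_true (lt_trans hgt (ht j hj))

-- A's fold over the reversed visiting order is exactly the record scan.
theorem pvFoldA_eq_recs (b : List Int) (W : List Int) :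
    List.foldl (pvStepA b) [] W.reverse = pvRecs b none W := by
  induction W with
  | nil => rfl
  | cons i W ih =>
    rw [List.reverse_cons, List.foldl_append]
    simp only [List.foldl, pvStepA, ih]
    simp only [pvRecs]
    congr 1
    rw [pvPop_eq_filter b _ _ (pvRecs_pairwise b W none), pvRecs_some_eq_filter]

-- B's fold is the record scan with an accumulator.
theorem pvFoldB_eq_recs (b : List Int) (W : List Int) :
    ∀ out best, (List.foldl (pvStepB b) (out, best) W).1 = out ++ pvRecs b best W := by
  induction W with
  | nil => intro out best; simp [pvRecs]
  | cons i W ih =>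
    intro out best
    match best with
    | none =>
      simp only [List.foldl, pvStepB, pvRecs]
      rw [ih]
      simp
    | some m =>
      simp only [List.foldl, pvStepB, pvRecs]
      by_cases hm : m < PySem.List.pyGetD b i 0
      · rw [if_pos hm, if_pos hm, ih]; simp
      · rw [if_neg hm, if_neg hm, ih]

-- A's while loop, EAST: fuel f from start s with s + f = n visits s, s+1, …, n-1.
theorem pvLoopA_east (b : List Int) :
    ∀ (f s : Nat) (r : List Int), s + f = b.length →
      pvLoopA b 1 f (s : Int) r
        = List.foldl (pvStepA b) r ((List.range' s f).map Int.ofNat) := by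
  intro f
  induction f with
  | zero => intro s r _; rfl
  | succ f ih =>
    intro s r hsf
    have hlt : (s : Int) < (b.length : Int) := by
      have : s < b.length := by omega
      exact_mod_cast this
    simp only [pvLoopA, List.range'_succ]
    rw [if_pos ⟨Int.natCast_nonneg s, hlt⟩]
    have : (s : Int) + 1 = ((s + 1 : Nat) : Int) := by push_cast; ring
    rw [this, ih (s + 1) _ (by omega)]
    rfl

-- A's while loop, non-EAST: fuel f from index f-1 visits f-1, f-2, …, 0.
theorem pvLoopA_west (b : List Int) :
    ∀ (f : Nat) (r : List Int), f ≤ b.length →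
      pvLoopA b (-1) f ((f : Int) - 1) r
        = List.foldl (pvStepA b) r (((List.range' 0 f).map Int.ofNat).reverse) := by
  intro f
  induction f with
  | zero => intro r _; rfl
  | succ f ih =>
    intro r hf
    have h0 : (0 : Int) ≤ ((f + 1 : Nat) : Int) - 1 := by push_cast; omega
    have hlt : ((f + 1 : Nat) : Int) - 1 < (b.length : Int) := by
      have : f < b.length := by omega
      push_cast; omega
    have hrange : List.range' 0 (f + 1) = List.range' 0 f ++ [f] := by
      simp [List.range'_concat]
    simp only [pvLoopA]
    rw [if_pos ⟨h0, hlt⟩, hrange]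
    simp only [List.map_append, List.map_cons, List.map_nil, List.reverse_append,
      List.reverse_cons, List.reverse_nil, List.nil_append, List.singleton_append,
      List.foldl_cons]
    have e1 : ((f + 1 : Nat) : Int) - 1 = (f : Int) := by push_cast; ring
    have e2 : (f : Int) + -1 = (f : Int) - 1 := by ring
    rw [e1, e2, ih _ (by omega)]
    rfl

-- The two range lists B uses, in terms of List.range'.
theorem pyRange_up_eq (n : Nat) :
    PySem.List.pyRange 0 (n : Int) 1 = (List.range' 0 n).map Int.ofNat := by
  rw [PySem.List.pyRange_one, show ((n : Int) - 0).toNat = n by omega, List.range_eq_range']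
  exact List.map_congr_left (fun k _ => by simp)

theorem pyRange_down_eq (n : Nat) :
    PySem.List.pyRange ((n : Int) - 1) (-1) (-1)
      = ((List.range' 0 n).map Int.ofNat).reverse := by
  rw [PySem.List.pyRange_neg_one_eq_reverse]
  have : ((-1 : Int) + 1) = 0 := by ring
  rw [this]
  have : ((n : Int) - 1) + 1 = (n : Int) := by ring
  rw [this, pyRange_up_eq]

-- ===== VERDICT (by name: the statement is the Claim_ definition above) =====
theorem count_buildings_facing_sunset_spec : Claim_equal_count_buildings_facing_sunset := by
  intro buildings direction _
  unfold Spec_count_buildings_facing_sunset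
  unfold count_buildings_facing_sunset count_buildings_facing_sunset_alt
  by_cases hdir : (direction == "EAST") = true
  · simp only [hdir, if_true]
    have hA := pvLoopA_east buildings buildings.length 0 [] (by omega)
    simp only [Nat.cast_zero] at hA
    have hW := pvFoldA_eq_recs buildings
      (((List.range' 0 buildings.length).map Int.ofNat).reverse)
    rw [List.reverse_reverse] at hW
    rw [hA, hW, pyRange_down_eq buildings.length, pvFoldB_eq_recs, List.nil_append]
  · simp only [hdir, if_false, Bool.false_eq_true]
    rw [pvLoopA_west buildings buildings.length [] (le_refl _), pyRange_up_eq buildings.length,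
      pvFoldB_eq_recs, List.nil_append, ← pvFoldA_eq_recs]
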